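-- pv_equiv track=rewrite | github.com/differentname123/auto_video | utils/paddle_ocr_video.py | get_union_box
-- ===== SOURCE A (Python) =====
-- def get_union_box(boxes):
--     """计算一组框的最小包围框 (Union Box)"""
--     if not boxes:
--         return []
--
--     # 展平所有坐标点
--     all_x = []
--     all_y = []
--     for box in boxes:
--         # box 格式通常为 [[x1,y1], [x2,y2], [x3,y3], [x4,y4]]
--         if not box: continue
--         for point in box:
--             all_x.append(point[0])
--             all_y.append(point[1])
--
--     if not all_x or not all_y:
--         return []
--
--     min_x, max_x = min(all_x), max(all_x)
--     min_y, max_y = min(all_y), max(all_y)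
--
--     # 返回标准的4点矩形框
--     return [
--         [min_x, min_y],
--         [max_x, min_y],
--         [max_x, max_y],
--         [min_x, max_y]
--     ]
-- ===== SOURCE B (Python) =====
-- def get_union_box(boxes):
--     """计算一组框的最小包围框 (Union Box) — single pass tracking running extrema."""
--     if not boxes:
--         return []
--     acc = None  # (min_x, max_x, min_y, max_y)
--     for box in boxes:
--         if not box: continue
--         for point in box:
--             x = point[0]
--             y = point[1]
--             if acc is None:
--                 acc = (x, x, y, y)
--             else:
--                 acc = (min(acc[0], x), max(acc[1], x), min(acc[2], y), max(acc[3], y))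
--     if acc is None:
--         return []
--     min_x, max_x, min_y, max_y = acc
--     return [
--         [min_x, min_y],
--         [max_x, min_y],
--         [max_x, max_y],
--         [min_x, max_y]
--     ]
-- ===== Notes on version B (the rewrite author's own statement) =====
-- stated objective: alternative
-- what changed: B makes one pass keeping a running (min_x, max_x, min_y, max_y) tuple instead of materialising all_x/all_y lists and calling min/max four times; no intermediate lists are built.
import Mathlib
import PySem

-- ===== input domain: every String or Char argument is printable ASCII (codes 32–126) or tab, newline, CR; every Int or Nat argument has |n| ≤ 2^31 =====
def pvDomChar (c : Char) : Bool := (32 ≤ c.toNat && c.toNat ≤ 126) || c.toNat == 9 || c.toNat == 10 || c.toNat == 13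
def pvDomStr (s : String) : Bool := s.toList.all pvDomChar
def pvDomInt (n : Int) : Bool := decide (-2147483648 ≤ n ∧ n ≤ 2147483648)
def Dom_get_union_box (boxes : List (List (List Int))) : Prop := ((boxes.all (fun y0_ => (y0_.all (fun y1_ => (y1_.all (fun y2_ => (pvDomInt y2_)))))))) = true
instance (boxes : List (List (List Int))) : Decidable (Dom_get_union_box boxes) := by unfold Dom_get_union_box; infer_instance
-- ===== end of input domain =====

-- B computes the union box in one pass with a running (min_x,max_x,min_y,max_y) tuple
-- instead of building all_x/all_y lists and calling min/max four times (alternative decomposition).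


-- ===== PORT A =====
-- collects all x / all y coordinates, then min/max each list (point[i] ported as pyGetD
-- with default 0; Pre_ excludes the points of length < 2 on which Python A raises IndexError)
def get_union_box (boxes : List (List (List Int))) : List (List Int) :=
  if boxes = [] then []
  else
    let acc : List Int × List Int :=
      boxes.foldl
        (fun acc box =>
          if box = [] then acc
          else
            box.foldl
              (fun acc2 point =>
                (acc2.1 ++ [PySem.List.pyGetD point 0 0],
                 acc2.2 ++ [PySem.List.pyGetD point 1 0]))
              acc)
        ([], [])
    let all_x := acc.1
    let all_y := acc.2
    if all_x = [] ∨ all_y = [] then []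
    else
      match PySem.List.min? all_x (fun v => v), PySem.List.max? all_x (fun v => v),
            PySem.List.min? all_y (fun v => v), PySem.List.max? all_y (fun v => v) with
      | some min_x, some max_x, some min_y, some max_y =>
          [[min_x, min_y], [max_x, min_y], [max_x, max_y], [min_x, max_y]]
      | _, _, _, _ => []

-- ===== PORT B =====
def get_union_box_alt (boxes : List (List (List Int))) : List (List Int) :=
  if boxes = [] then []
  else
    let acc : Option (Int × Int × Int × Int) :=
      boxes.foldl
        (fun a box =>
          if box = [] then a
          else
            box.foldl
              (fun a point =>
                let x := PySem.List.pyGetD point 0 0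
                let y := PySem.List.pyGetD point 1 0
                match a with
                | none => some (x, x, y, y)
                | some (mnx, mxx, mny, mxy) =>
                    some (min mnx x, max mxx x, min mny y, max mxy y))
              a)
        none
    match acc with
    | none => []
    | some (min_x, max_x, min_y, max_y) =>
        [[min_x, min_y], [max_x, min_y], [max_x, max_y], [min_x, max_y]]

-- ===== PRECONDITION & SPEC =====
-- Pre_ excludes exactly the inputs where some point has fewer than 2 coordinates:
-- there both Pythons raise IndexError on point[0]/point[1].
def Pre_get_union_box (boxes : List (List (List Int))) : Prop :=
  ∀ box ∈ boxes, ∀ point ∈ box, 2 ≤ point.length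
instance (boxes : List (List (List Int))) : Decidable (Pre_get_union_box boxes) := by
  unfold Pre_get_union_box; infer_instance
def pvWitness_get_union_box : List (List (List Int)) := [[[1, 2], [3, 0]], [], [[-5, 7]]]

def Spec_get_union_box (boxes : List (List (List Int))) (out : List (List Int)) : Prop := out = get_union_box_alt boxes
instance (boxes : List (List (List Int))) (out : List (List Int)) : Decidable (Spec_get_union_box boxes out) := by unfold Spec_get_union_box; infer_instance

-- ===== CLAIM (what is proved, stated in full; the proofs are below) =====
def Claim_equal_get_union_box : Prop := ∀ (boxes : List (List (List Int))), Dom_get_union_box boxes → Pre_get_union_box boxes → Spec_get_union_box boxes (get_union_box boxes)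

-- ===== LEMMAS AND PROOFS =====

-- the per-point steps of the two ports
def stepA (acc : List Int × List Int) (point : List Int) : List Int × List Int :=
  (acc.1 ++ [PySem.List.pyGetD point 0 0], acc.2 ++ [PySem.List.pyGetD point 1 0])

def stepB (a : Option (Int × Int × Int × Int)) (point : List Int) :
    Option (Int × Int × Int × Int) :=
  let x := PySem.List.pyGetD point 0 0
  let y := PySem.List.pyGetD point 1 0
  match a with
  | none => some (x, x, y, y)
  | some (mnx, mxx, mny, mxy) => some (min mnx x, max mxx x, min mny y, max mxy y)

-- the `if box = [] then acc` skip is the identity fold on an empty list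
lemma foldA_flatten (boxes : List (List (List Int))) (acc : List Int × List Int) :
    boxes.foldl (fun acc box => if box = [] then acc else box.foldl stepA acc) acc
      = boxes.flatten.foldl stepA acc := by
  induction boxes generalizing acc with
  | nil => rfl
  | cons b t ih =>
      simp only [List.foldl_cons, List.flatten_cons, List.foldl_append]
      by_cases hb : b = [] <;> simp [hb, ih]

lemma foldB_flatten (boxes : List (List (List Int))) (a : Option (Int × Int × Int × Int)) :
    boxes.foldl (fun a box => if box = [] then a else box.foldl stepB a) a
      = boxes.flatten.foldl stepB a := by
  induction boxes generalizing a with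
  | nil => rfl
  | cons b t ih =>
      simp only [List.foldl_cons, List.flatten_cons, List.foldl_append]
      by_cases hb : b = [] <;> simp [hb, ih]

-- the A-side fold just appends the two coordinate maps
lemma foldA_eq_map (pts : List (List Int)) (xs ys : List Int) :
    pts.foldl stepA (xs, ys)
      = (xs ++ pts.map (fun p => PySem.List.pyGetD p 0 0),
         ys ++ pts.map (fun p => PySem.List.pyGetD p 1 0)) := by
  induction pts generalizing xs ys with
  | nil => simp
  | cons p t ih => simp [stepA, ih]

-- the B-side fold from a `some` state is the four running extrema
lemma foldB_some (pts : List (List Int)) (mnx mxx mny mxy : Int) :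
    pts.foldl stepB (some (mnx, mxx, mny, mxy))
      = some ((pts.map (fun p => PySem.List.pyGetD p 0 0)).foldl min mnx,
              (pts.map (fun p => PySem.List.pyGetD p 0 0)).foldl max mxx,
              (pts.map (fun p => PySem.List.pyGetD p 1 0)).foldl min mny,
              (pts.map (fun p => PySem.List.pyGetD p 1 0)).foldl max mxy) := by
  induction pts generalizing mnx mxx mny mxy with
  | nil => simp
  | cons p t ih => simp [stepB, ih]

-- the port definitions restated with the named steps (definitional)
lemma A_as_step (boxes : List (List (List Int))) :
    get_union_box boxes =
      (if boxes = [] then []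
       else
         let acc := boxes.foldl (fun acc box => if box = [] then acc else box.foldl stepA acc) ([], [])
         if acc.1 = [] ∨ acc.2 = [] then []
         else
           match PySem.List.min? acc.1 (fun v => v), PySem.List.max? acc.1 (fun v => v),
                 PySem.List.min? acc.2 (fun v => v), PySem.List.max? acc.2 (fun v => v) with
           | some min_x, some max_x, some min_y, some max_y =>
               [[min_x, min_y], [max_x, min_y], [max_x, max_y], [min_x, max_y]]
           | _, _, _, _ => []) := rfl

lemma B_as_step (boxes : List (List (List Int))) :
    get_union_box_alt boxes =
      (if boxes = [] then []
       else
         match boxes.foldl (fun a box => if box = [] then a else box.foldl stepB a) none with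
         | none => []
         | some (min_x, max_x, min_y, max_y) =>
             [[min_x, min_y], [max_x, min_y], [max_x, max_y], [min_x, max_y]]) := rfl

-- ===== VERDICT (by name: the statement is the Claim_ definition above) =====
theorem get_union_box_spec : Claim_equal_get_union_box := by
  intro boxes _ _
  unfold Spec_get_union_box
  rw [A_as_step, B_as_step]
  by_cases hb : boxes = []
  · simp [hb]
  · simp only [hb, if_false]
    rw [foldA_flatten, foldB_flatten]
    cases hpts : boxes.flatten with
    | nil => simp
    | cons p t =>
        rw [foldA_eq_map, List.foldl_cons]
        have hB0 : stepB none p =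
            some (PySem.List.pyGetD p 0 0, PySem.List.pyGetD p 0 0,
                  PySem.List.pyGetD p 1 0, PySem.List.pyGetD p 1 0) := rfl
        rw [hB0, foldB_some]
        simp [PySem.List.min?_id_cons, PySem.List.max?_id_cons]
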